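-- pv_equiv track=rewrite | github.com/dvaumoron/fourreToutPython | src/compress.py | convert_bin_to_hex
-- ===== SOURCE A (Python) =====
-- bin_to_hex = {"0000": "0", "0001": "1", "0010": "2", "0011": "3",
--               "0100": "4", "0101": "5", "0110": "6", "0111": "7",
--               "1000": "8", "1001": "9", "1010": "a", "1011": "b",
--               "1100": "c", "1101": "d", "1110": "e", "1111": "f"}
--
-- def convert_bin_to_hex(phrase):
--     n = len(phrase)
--     skip = n % 8
--     if skip != 0:
--         skip = 8 - skip
--         phrase += "0" * skip
--         n += skip
--     buffer = []
--     append = buffer.append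
--     for i in range(0, n, 4):
--         append(bin_to_hex[phrase[i:i + 4]])
--     return skip, "".join(buffer)
-- ===== SOURCE B (Python) =====
-- HEX_DIGITS = "0123456789abcdef"
--
-- def convert_bin_to_hex(phrase):
--     skip = -len(phrase) % 8
--     out = []
--     acc = cnt = 0
--     for ch in phrase + "0" * skip:
--         acc = acc * 2 + "01".index(ch)
--         cnt += 1
--         if cnt == 4:
--             out.append(HEX_DIGITS[acc])
--             acc = cnt = 0
--     return skip, "".join(out)
-- ===== Notes on version B (the rewrite author's own statement) =====
-- stated objective: alternative
-- what changed: Replaces the slice-every-4-chars-and-look-up-in-a-16-entry-dict loop by a single streaming pass over the characters that builds each hex digit arithmetically in a bit accumulator and indexes a digit string, with the pad amount computed in one step as -len(phrase) % 8.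
import Mathlib
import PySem

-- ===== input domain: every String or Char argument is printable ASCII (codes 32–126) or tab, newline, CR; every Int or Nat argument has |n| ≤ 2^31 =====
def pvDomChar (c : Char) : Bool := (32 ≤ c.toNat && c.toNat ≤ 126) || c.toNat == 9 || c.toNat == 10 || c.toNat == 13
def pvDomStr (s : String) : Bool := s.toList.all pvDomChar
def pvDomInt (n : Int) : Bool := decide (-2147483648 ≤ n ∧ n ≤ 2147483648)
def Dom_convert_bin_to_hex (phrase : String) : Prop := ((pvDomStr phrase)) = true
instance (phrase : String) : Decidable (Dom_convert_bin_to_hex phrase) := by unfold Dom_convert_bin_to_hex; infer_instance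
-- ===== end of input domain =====

-- B replaces A's slice-4-chars-then-dict-lookup loop by one streaming pass with a bit
-- accumulator (objective: alternative, same asymptotic cost).

-- ===== PORT A =====
-- the module-level dict bin_to_hex (keys/values kept as char lists; proofs work on the list side)
def binToHex : PySem.Dict (List Char) (List Char) :=
  PySem.Dict.ofList
    [(['0','0','0','0'], ['0']), (['0','0','0','1'], ['1']),
     (['0','0','1','0'], ['2']), (['0','0','1','1'], ['3']),
     (['0','1','0','0'], ['4']), (['0','1','0','1'], ['5']),
     (['0','1','1','0'], ['6']), (['0','1','1','1'], ['7']),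
     (['1','0','0','0'], ['8']), (['1','0','0','1'], ['9']),
     (['1','0','1','0'], ['a']), (['1','0','1','1'], ['b']),
     (['1','1','0','0'], ['c']), (['1','1','0','1'], ['d']),
     (['1','1','1','0'], ['e']), (['1','1','1','1'], ['f'])]

-- bin_to_hex[chunk]: the KeyError case (= getD's default, never hit under Pre_) is excluded by Pre_
def convert_bin_to_hex (phrase : String) : Int × String :=
  let n : Int := PySem.Str.len phrase
  let skip : Int := PySem.Int.mod n 8
  let (skip, cs, n) :=
    if skip ≠ 0 then
      let skip2 := 8 - skip
      (skip2, phrase.toList ++ PySem.List.pyRepeat ['0'] skip2, n + skip2)   -- phrase += "0" * skip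
    else
      (skip, phrase.toList, n)
  let buffer : List (List Char) :=
    (PySem.List.pyRange 0 n 4).foldl
      (fun buf i => buf ++ [PySem.Dict.getD binToHex (PySem.List.slice cs (some i) (some (i + 4))) []]) []
  (skip, String.ofList (PySem.Chars.join [] buffer))   -- "".join(buffer)

-- ===== PORT B =====
def hexDigitsB : List Char := ['0','1','2','3','4','5','6','7','8','9','a','b','c','d','e','f']

-- loop body of Source B's single for-loop (state = (out, acc, cnt)).
-- "01".index(ch) raises ValueError on a non-binary char (= the -1 of Chars.find; excluded
-- by Pre_); HEX_DIGITS[acc] is pyGetD — acc < 16 always, so that Python indexing never raises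
def bStep (s : List Char × Int × Int) (ch : Char) : List Char × Int × Int :=
  let acc := s.2.1 * 2 + PySem.Chars.find ['0','1'] [ch]
  let cnt := s.2.2 + 1
  if cnt = 4 then (s.1 ++ [PySem.List.pyGetD hexDigitsB acc '0'], 0, 0) else (s.1, acc, cnt)

def convert_bin_to_hex_alt (phrase : String) : Int × String :=
  let skip : Int := PySem.Int.mod (-(PySem.Str.len phrase)) 8
  let padded := phrase.toList ++ PySem.List.pyRepeat ['0'] skip
  let st := padded.foldl bStep ([], 0, 0)
  (skip, String.ofList st.1)

-- ===== PRECONDITION & SPEC =====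
-- Pre_ excludes exactly the inputs containing a character other than '0'/'1':
-- there A raises KeyError (some padded 4-char slice is not a key of bin_to_hex).
def Pre_convert_bin_to_hex (phrase : String) : Prop :=
  phrase.toList.all (fun c => c == '0' || c == '1') = true
instance (phrase : String) : Decidable (Pre_convert_bin_to_hex phrase) := by
  unfold Pre_convert_bin_to_hex; infer_instance

def pvWitness_convert_bin_to_hex : String := "10110"

def Spec_convert_bin_to_hex (phrase : String) (out : Int × String) : Prop := out = convert_bin_to_hex_alt phrase
instance (phrase : String) (out : Int × String) : Decidable (Spec_convert_bin_to_hex phrase out) := by unfold Spec_convert_bin_to_hex; infer_instance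

-- ===== CLAIM (what is proved, stated in full; the proofs are below) =====
def Claim_equal_convert_bin_to_hex : Prop := ∀ (phrase : String), Dom_convert_bin_to_hex phrase → Pre_convert_bin_to_hex phrase → Spec_convert_bin_to_hex phrase (convert_bin_to_hex phrase)

-- ===== LEMMAS AND PROOFS =====

-- the list of consecutive 4-char chunks (proof-side view of both loops)
def chunks4 : List Char → List (List Char)
  | c0 :: c1 :: c2 :: c3 :: rest => [c0, c1, c2, c3] :: chunks4 rest
  | _ => []

-- B's streaming fold, characterised chunkwise
lemma bcore : ∀ (cs : List Char), cs.length % 4 = 0 →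
    (∀ c ∈ cs, c = '0' ∨ c = '1') → ∀ (out : List Char),
    cs.foldl bStep (out, 0, 0) =
      (out ++ ((chunks4 cs).map (fun ch => PySem.Dict.getD binToHex ch [])).flatten, 0, 0) := by
  intro cs
  induction cs using chunks4.induct with
  | case1 c0 c1 c2 c3 rest ih =>
    intro hlen hbin out
    have hr : rest.length % 4 = 0 := by simp at hlen; omega
    have hb : ∀ c ∈ rest, c = '0' ∨ c = '1' := fun c hc => hbin c (by simp [hc])
    have h0 := hbin c0 (by simp); have h1 := hbin c1 (by simp)
    have h2 := hbin c2 (by simp); have h3 := hbin c3 (by simp)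
    simp only [List.foldl_cons]
    have hstep : bStep (bStep (bStep (bStep (out, 0, 0) c0) c1) c2) c3
        = (out ++ PySem.Dict.getD binToHex [c0, c1, c2, c3] [], 0, 0) := by
      rcases h0 with rfl | rfl <;> rcases h1 with rfl | rfl <;>
        rcases h2 with rfl | rfl <;> rcases h3 with rfl | rfl <;>
        simp [bStep] <;> decide
    rw [hstep, ih hr hb]
    simp [chunks4]
  | case2 cs h =>
    intro hlen hbin out
    rcases cs with _|⟨a,_|⟨b,_|⟨c,_|⟨d,t⟩⟩⟩⟩
    · simp [chunks4]
    · simp at hlen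
    · simp at hlen
    · simp at hlen
    · exact absurd rfl (h a b c d t)

lemma pyRange4 (k : Nat) :
    PySem.List.pyRange 0 ((4 * k : Nat) : Int) 4 =
      (List.range k).map (fun j => ((4 * j : Nat) : Int)) := by
  rw [PySem.List.pyRange_of_pos 0 _ (by norm_num)]
  rcases Nat.eq_zero_or_pos k with rfl | hk
  · simp
  · have hlt : (0 : Int) < ((4 * k : Nat) : Int) := by push_cast; omega
    simp only [if_pos hlt]
    have : ((((4 * k : Nat) : Int) - 0 + 4 - 1) / 4).toNat = k := by omega
    rw [this]
    apply List.map_congr_left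
    intro j hj
    push_cast
    ring

-- A's range-and-slice loop produces exactly the 4-char chunks
lemma chunks_map (k : Nat) : ∀ (cs : List Char), cs.length = 4 * k →
    (PySem.List.pyRange 0 ((4 * k : Nat) : Int) 4).map
        (fun i => PySem.List.slice cs (some i) (some (i + 4))) = chunks4 cs := by
  induction k with
  | zero =>
    intro cs hlen
    rw [pyRange4]
    rcases List.length_eq_zero_iff.mp (by omega : cs.length = 0) with rfl
    simp [chunks4]
  | succ k ih =>
    intro cs hlen
    rcases cs with _|⟨c0,_|⟨c1,_|⟨c2,_|⟨c3,rest⟩⟩⟩⟩ <;> simp at hlen <;> try omega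
    have hrest : rest.length = 4 * k := by omega
    rw [pyRange4, List.range_succ_eq_map]
    simp only [List.map_cons, List.map_map]
    have hhead : PySem.List.slice (c0::c1::c2::c3::rest) (some ((0 : Nat) : Int)) (some (((0:Nat) : Int) + 4)) = [c0,c1,c2,c3] := by
      have := PySem.List.slice_natCast_add (c0::c1::c2::c3::rest) 0 4
      simpa using this
    have htail : ∀ j : Nat,
        PySem.List.slice (c0::c1::c2::c3::rest) (some ((4 * (j+1) : Nat) : Int)) (some (((4 * (j+1) : Nat) : Int) + 4)) =
          PySem.List.slice rest (some ((4 * j : Nat) : Int)) (some (((4 * j : Nat) : Int) + 4)) := by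
      intro j
      have h1 := PySem.List.slice_natCast_add (c0::c1::c2::c3::rest) (4*(j+1)) 4
      have h2 := PySem.List.slice_natCast_add rest (4*j) 4
      push_cast at h1 h2 ⊢
      rw [h1, h2]
      have h3 : (4 * (j+1)) = 4 + 4 * j := by ring
      rw [h3]
      have h4 : List.drop (4 + 4*j) (c0::c1::c2::c3::rest) = List.drop (4*j) rest := by
        rw [← List.drop_drop]
        rfl
      rw [h4]
    rw [show chunks4 (c0::c1::c2::c3::rest) = [c0,c1,c2,c3] :: chunks4 rest from rfl]
    rw [← ih rest hrest, pyRange4]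
    simp only [List.map_map]
    refine congrArg₂ List.cons ?_ (List.map_congr_left ?_)
    · simpa using hhead
    · intro j hj
      simpa using htail j

-- "".join = flatten
lemma join_nil_eq_flatten (xs : List (List Char)) : PySem.Chars.join [] xs = xs.flatten := by
  induction xs with
  | nil => rfl
  | cons h t ih =>
    simp [PySem.Chars.join, List.intercalate] at *
    cases t <;> simp_all

-- A's fused loop body, re-expressed through chunks4
lemma achunks (k : Nat) (cs : List Char) (hlen : cs.length = 4 * k) :
    (PySem.List.pyRange 0 ((4 * k : Nat) : Int) 4).map
        (fun i => PySem.Dict.getD binToHex (PySem.List.slice cs (some i) (some (i + 4))) []) =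
      (chunks4 cs).map (fun ch => PySem.Dict.getD binToHex ch []) := by
  rw [← chunks_map k cs hlen, List.map_map]
  rfl

-- ===== VERDICT (by name: the statement is the Claim_ definition above) =====
theorem convert_bin_to_hex_spec : Claim_equal_convert_bin_to_hex := by
  intro phrase _ hpre0
  have hpre : ∀ c ∈ phrase.toList, c = '0' ∨ c = '1' := by
    simpa [Pre_convert_bin_to_hex] using hpre0
  unfold Spec_convert_bin_to_hex
  have hmodA : PySem.Int.mod ((phrase.toList.length : Int)) 8 = (phrase.toList.length : Int) % 8 := by
    simp [PySem.Int.mod, Int.fmod_eq_emod]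
  have hmodB : PySem.Int.mod (-(phrase.toList.length : Int)) 8 = (-(phrase.toList.length : Int)) % 8 := by
    simp [PySem.Int.mod, Int.fmod_eq_emod]
  simp only [convert_bin_to_hex, convert_bin_to_hex_alt, PySem.Str.len_eq, hmodA, hmodB]
  by_cases hz : ((phrase.toList.length : Int)) % 8 = 0
  · -- no padding needed
    have hzB : (-(phrase.toList.length : Int)) % 8 = 0 := by omega
    obtain ⟨k, hk⟩ : ∃ k : Nat, phrase.toList.length = 4 * k := by
      refine ⟨phrase.toList.length / 4, by omega⟩
    simp only [hz, hzB, ne_eq, not_true_eq_false, if_false,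
      PySem.List.pyRepeat_singleton, Int.toNat_zero, List.replicate_zero, List.append_nil]
    rw [show ((phrase.toList.length : Nat) : Int) = ((4 * k : Nat) : Int) from by rw [hk]]
    rw [PySem.List.foldl_append_singleton_eq_map, List.nil_append, achunks k _ hk,
      join_nil_eq_flatten, bcore phrase.toList (by omega) hpre []]
    simp
  · -- padding branch
    have hzB : (-(phrase.toList.length : Int)) % 8 = 8 - (phrase.toList.length : Int) % 8 := by
      omega
    simp only [ne_eq, hz, not_false_eq_true, if_true, hzB]
    set s : Int := 8 - (phrase.toList.length : Int) % 8 with hs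
    have hsrange : 0 < s ∧ s < 8 := by constructor <;> omega
    set p : List Char := phrase.toList ++ PySem.List.pyRepeat ['0'] s with hp
    have hplen : p.length = phrase.toList.length + s.toNat := by
      rw [hp, PySem.List.pyRepeat_singleton]; simp
    obtain ⟨k, hk⟩ : ∃ k : Nat, p.length = 4 * k := by
      refine ⟨p.length / 4, ?_⟩
      have : ((p.length : Nat) : Int) % 4 = 0 := by rw [hplen]; push_cast; omega
      omega
    have hpbin : ∀ c ∈ p, c = '0' ∨ c = '1' := by
      intro c hc
      rw [hp, PySem.List.pyRepeat_singleton] at hc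
      rcases List.mem_append.mp hc with h | h
      · exact hpre c h
      · left; exact List.eq_of_mem_replicate h
    rw [show ((phrase.toList.length : Nat) : Int) + s = ((4 * k : Nat) : Int) from by
      rw [← hk, hplen]; push_cast; omega]
    rw [PySem.List.foldl_append_singleton_eq_map, List.nil_append, achunks k p hk,
      join_nil_eq_flatten, bcore p (by omega) hpbin []]
    simp
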